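-- pv_equiv track=rewrite | github.com/posl/comment_recommendation | script/mod_gen/4_time/zh/238_C/3.py | solve
-- ===== SOURCE A (Python) =====
-- def solve(n):
--     mod = 998244353
--     ans = 0
--     x = 1
--     while x <= n:
--         y = min(n, x * 10 - 1)
--         ans += (x + y) * (y - x + 1) // 2 * len(str(x))
--         ans %= mod
--         x *= 10
--     return ans
-- ===== SOURCE B (Python) =====
-- def solve(n):
--     mod = 998244353
--     if n < 1:
--         return 0
--     total = 0
--     p = 1
--     while p <= n:
--         total += n * (n + 1) // 2 - p * (p - 1) // 2
--         p *= 10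
--     return total % mod
-- ===== Notes on version B (the rewrite author's own statement) =====
-- stated objective: alternative
-- what changed: Replaces A's per-decade digit-weighted arithmetic series (avg formula times len(str(x)), mod each pass) with the layer-cake identity: for every power of ten p <= n it adds the plain tail sum k=p..n of k via triangular numbers, with no digit-length computation, no min, and a single final mod.
import Mathlib
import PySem

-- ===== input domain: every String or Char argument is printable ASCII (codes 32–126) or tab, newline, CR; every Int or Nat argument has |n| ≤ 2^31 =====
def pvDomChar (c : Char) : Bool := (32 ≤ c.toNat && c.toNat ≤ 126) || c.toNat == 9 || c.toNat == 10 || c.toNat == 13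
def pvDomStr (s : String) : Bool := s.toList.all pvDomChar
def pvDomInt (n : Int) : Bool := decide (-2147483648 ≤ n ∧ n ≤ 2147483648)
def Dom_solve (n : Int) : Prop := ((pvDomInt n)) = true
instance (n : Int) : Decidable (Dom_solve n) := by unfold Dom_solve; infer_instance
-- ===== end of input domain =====

-- B replaces A's per-decade digit-weighted series with the layer-cake identity:
-- for every power of ten p ≤ n it adds the plain tail sum of k from p to n via
-- triangular numbers (no digit lengths, no min, one final mod); objective: alternative.

-- ===== PORT A =====
def pvMod : Int := 998244353
-- len(str(k)) as an Int
def pvLen (k : Int) : Int := PySem.Str.len (PySem.Int.toStr k)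
-- A's while-loop; fuel only makes the recursion total (x starts at 1 and is
-- multiplied by 10 each pass, so on Dom (|n| ≤ 2^31) at most 11 passes run and
-- fuel 64 is never exhausted)
def solveLoop (fuel : Nat) (n ans x : Int) : Int :=
  match fuel with
  | 0 => ans
  | fuel + 1 =>
    if x ≤ n then
      let y := min n (x * 10 - 1)
      solveLoop fuel n
        (PySem.Int.mod (ans + PySem.Int.floordiv ((x + y) * (y - x + 1)) 2 * pvLen x) pvMod)
        (x * 10)
    else ans

def solve (n : Int) : Int := solveLoop 64 n 0 1

-- ===== PORT B =====
-- B's while-loop; as for A, fuel only makes the recursion total (p starts at 1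
-- and is multiplied by 10 each pass, so on Dom fuel 64 is never exhausted)
def solveAltLoop (fuel : Nat) (n total p : Int) : Int :=
  match fuel with
  | 0 => total
  | fuel + 1 =>
    if p ≤ n then
      solveAltLoop fuel n
        (total + (PySem.Int.floordiv (n * (n + 1)) 2 - PySem.Int.floordiv (p * (p - 1)) 2))
        (p * 10)
    else total

def solve_alt (n : Int) : Int :=
  if n < 1 then 0 else PySem.Int.mod (solveAltLoop 64 n 0 1) pvMod

-- ===== PRECONDITION & SPEC =====
def Spec_solve (n : Int) (out : Int) : Prop := out = solve_alt n
instance (n : Int) (out : Int) : Decidable (Spec_solve n out) := by unfold Spec_solve; infer_instance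

-- ===== CLAIM (what is proved, stated in full; the proofs are below) =====
def Claim_equal_solve : Prop := ∀ (n : Int), Dom_solve n → Spec_solve n (solve n)

-- ===== LEMMAS AND PROOFS =====

-- Python % mod with the positive modulus is Lean's emod
lemma pvmod_eq (a : Int) : PySem.Int.mod a pvMod = a % 998244353 := by
  simp [PySem.Int.mod, pvMod, Int.fmod_eq_emod]

-- exact length of the decimal digit string
lemma toDigitsCore_len (n : Nat) :
    ∀ (f : Nat) (l : List Char), n < f →
      (Nat.toDigitsCore 10 f n l).length = Nat.log 10 n + 1 + l.length := by
  induction n using Nat.strong_induction_on with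
  | _ n ih =>
    intro f l hf
    match f, hf with
    | f + 1, _ =>
      simp only [Nat.toDigitsCore]
      by_cases h : n / 10 = 0
      · have hn : n < 10 := by
          rcases Nat.div_eq_zero_iff.mp h with h' | h' <;> omega
        rw [if_pos h]
        have : Nat.log 10 n = 0 := Nat.log_eq_zero_iff.mpr (Or.inl hn)
        simp [this]
        omega
      · have hn : 10 ≤ n := by
          by_contra hlt
          exact h (Nat.div_eq_zero_iff.mpr (Or.inr (by omega)))
        rw [if_neg h]
        have hdiv : n / 10 < n := Nat.div_lt_self (by omega) (by omega)
        rw [ih (n / 10) hdiv f (Nat.digitChar (n % 10) :: l) (by omega)]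
        have hlog : Nat.log 10 (n / 10) = Nat.log 10 n - 1 := Nat.log_div_base 10 n
        have hpos : 0 < Nat.log 10 n := Nat.log_pos (by norm_num) hn
        simp only [List.length_cons]
        omega

lemma pvLen_eq_log (k : Int) (hk : 1 ≤ k) :
    pvLen k = (Nat.log 10 k.toNat : Int) + 1 := by
  unfold pvLen PySem.Str.len PySem.Int.toStr PySem.Int.toChars
  rw [if_neg (by omega)]
  rw [Nat.toDigits]
  simp [toDigitsCore_len k.toNat (k.toNat + 1) [] (Nat.lt_succ_self _)]

-- all integers of one decade have decimal strings of the same length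
lemma pvLen_const (e : Nat) (k : Int)
    (h1 : (10 : Int) ^ e ≤ k) (h2 : k < 10 ^ (e + 1)) :
    pvLen k = pvLen ((10 : Int) ^ e) := by
  have hXpos : (1 : Int) ≤ (10 : Int) ^ e := one_le_pow₀ (by norm_num)
  have hk1 : 1 ≤ k := le_trans hXpos h1
  have hcastX : ((10 : Int) ^ e) = ((10 ^ e : Nat) : Int) := by push_cast; ring
  have hcastX1 : ((10 : Int) ^ (e + 1)) = ((10 ^ (e + 1) : Nat) : Int) := by push_cast; ring
  rw [pvLen_eq_log k hk1, pvLen_eq_log _ hXpos]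
  have hb1 : (10 : Nat) ^ e ≤ k.toNat := by
    rw [hcastX] at h1; omega
  have hb2 : k.toNat < 10 ^ (e + 1) := by
    rw [hcastX1] at h2; omega
  rw [Nat.log_eq_of_pow_le_of_lt_pow hb1 hb2]
  have : ((10 : Int) ^ e).toNat = 10 ^ e := by rw [hcastX]; exact Int.toNat_natCast _
  rw [this, Nat.log_pow (by norm_num)]

-- the weighted prefix sum Σ_{k=1}^m k * len(str(k))
def Sn : Nat → Int
  | 0 => 0
  | m + 1 => Sn m + ((m : Int) + 1) * pvLen ((m : Int) + 1)

-- triangular number as B computes it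
def Tm (m : Int) : Int := PySem.Int.floordiv (m * (m + 1)) 2

lemma twoTm (m : Int) : 2 * Tm m = m * (m + 1) := by
  obtain ⟨t, ht⟩ := (Int.even_mul_succ_self m).two_dvd
  unfold Tm PySem.Int.floordiv
  rw [ht, Int.mul_fdiv_cancel_left t (by norm_num)]

lemma pvLen_pow (e : Nat) : pvLen ((10 : Int) ^ e) = (e : Int) + 1 := by
  have hXpos : (1 : Int) ≤ (10 : Int) ^ e := one_le_pow₀ (by norm_num)
  rw [pvLen_eq_log _ hXpos]
  have hcastX : ((10 : Int) ^ e) = ((10 ^ e : Nat) : Int) := by push_cast; ring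
  have : ((10 : Int) ^ e).toNat = 10 ^ e := by rw [hcastX]; exact Int.toNat_natCast _
  rw [this, Nat.log_pow (by norm_num)]

-- ===== A side =====
lemma loop_exit (fuel : Nat) (n ans x : Int) (h : n < x) :
    solveLoop fuel n ans x = ans := by
  cases fuel <;> simp [solveLoop, not_le.mpr h]

-- doubled decade sum (avoids division)
lemma two_mul_Sn (e m : Nat) (h1 : 10 ^ e ≤ m) (h2 : m < 10 ^ (e + 1)) :
    2 * (Sn m - Sn (10 ^ e - 1)) =
      ((10 : Int) ^ e + (m : Int)) * ((m : Int) - 10 ^ e + 1) * pvLen ((10 : Int) ^ e) := by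
  induction m, h1 using Nat.le_induction with
  | base =>
    have hpos : 1 ≤ (10 : Nat) ^ e := Nat.one_le_pow _ _ (by norm_num)
    have hsucc : (10 : Nat) ^ e = (10 ^ e - 1) + 1 := by omega
    rw [hsucc]
    simp only [Sn]
    have ha : ((10 ^ e - 1 : Nat) : Int) = (10 : Int) ^ e - 1 := by
      rw [Nat.cast_sub hpos]; push_cast; ring
    push_cast
    rw [ha]
    ring_nf
  | succ m hm ih =>
    have hm2 : m < 10 ^ (e + 1) := by omega
    have ih' := ih hm2
    simp only [Sn]
    have hL : pvLen ((m : Int) + 1) = pvLen ((10 : Int) ^ e) := by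
      apply pvLen_const e
      · have h := (Nat.cast_le (α := Int)).mpr hm
        push_cast at h; omega
      · have h := (Nat.cast_lt (α := Int)).mpr h2
        push_cast at h; omega
    rw [hL]
    push_cast
    push_cast at ih'
    linear_combination ih'

lemma two_dvd_ap (a b : Int) : (2 : Int) ∣ (a + b) * (b - a + 1) := by
  rcases Int.even_or_odd (a + b) with h | h
  · exact Dvd.dvd.mul_right h.two_dvd _
  · have : Even (b - a + 1) := by rcases h with ⟨k, hk⟩; exact ⟨b - a + 1 - (b - k), by omega⟩
    exact Dvd.dvd.mul_left this.two_dvd _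

-- A's per-decade closed form equals the prefix-sum difference
lemma group_eq (e : Nat) (y : Int)
    (h1 : (10 : Int) ^ e ≤ y) (h2 : y ≤ 10 ^ (e + 1) - 1) :
    PySem.Int.floordiv (((10 : Int) ^ e + y) * (y - 10 ^ e + 1)) 2 * pvLen ((10 : Int) ^ e)
      = Sn y.toNat - Sn (10 ^ e - 1) := by
  have hXpos : (1 : Int) ≤ (10 : Int) ^ e := one_le_pow₀ (by norm_num)
  have hy0 : 0 ≤ y := by omega
  have hycast : ((y.toNat : Int)) = y := Int.toNat_of_nonneg hy0
  have hb1 : (10 : Nat) ^ e ≤ y.toNat := by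
    have : ((10 ^ e : Nat) : Int) ≤ y := by push_cast; omega
    omega
  have hb2 : y.toNat < 10 ^ (e + 1) := by
    have : y < ((10 ^ (e + 1) : Nat) : Int) := by push_cast; omega
    omega
  obtain ⟨t, ht⟩ := two_dvd_ap ((10 : Int) ^ e) y
  have hfd : PySem.Int.floordiv (((10 : Int) ^ e + y) * (y - 10 ^ e + 1)) 2 = t := by
    unfold PySem.Int.floordiv
    rw [ht]
    exact Int.mul_fdiv_cancel_left t (by norm_num)
  rw [hfd]
  have hdm := two_mul_Sn e y.toNat hb1 hb2
  rw [hycast] at hdm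
  have h2t : ((10 : Int) ^ e + y) * (y - 10 ^ e + 1) * pvLen ((10 : Int) ^ e)
      = 2 * (t * pvLen ((10 : Int) ^ e)) := by rw [ht]; ring
  linarith [hdm, h2t]

lemma loop_eq (fuel : Nat) :
    ∀ (e : Nat) (n ans : Int), (10 : Int) ^ e ≤ n → n < 10 ^ e * 10 ^ fuel →
      solveLoop fuel n ans ((10 : Int) ^ e)
        = (ans + (Sn n.toNat - Sn (10 ^ e - 1))) % 998244353 := by
  induction fuel with
  | zero =>
    intro e n ans hx hf
    simp only [pow_zero, mul_one] at hf
    omega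
  | succ fuel ih =>
    intro e n ans hx hf
    simp only [solveLoop, if_pos hx]
    have hnext : (10 : Int) ^ e * 10 = 10 ^ (e + 1) := by ring
    by_cases hc : n ≤ (10 : Int) ^ e * 10 - 1
    · -- last pass: y = n, then the loop exits
      have hymin : min n ((10 : Int) ^ e * 10 - 1) = n := min_eq_left hc
      rw [hymin, loop_exit _ _ _ _ (by omega)]
      rw [pvmod_eq, group_eq e n hx (by omega)]
    · -- full decade, recurse on the next power of ten
      rw [not_le] at hc
      have hymin : min n ((10 : Int) ^ e * 10 - 1) = (10 : Int) ^ e * 10 - 1 :=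
        min_eq_right (by omega)
      rw [hymin]
      have hx' : (10 : Int) ^ (e + 1) ≤ n := by rw [← hnext]; omega
      have hf' : n < 10 ^ (e + 1) * 10 ^ fuel := by
        calc n < 10 ^ e * 10 ^ (fuel + 1) := hf
        _ = 10 ^ (e + 1) * 10 ^ fuel := by ring
      rw [hnext, ih (e + 1) n _ hx' hf']
      have hgrp := group_eq e ((10 : Int) ^ (e + 1) - 1) (by
          have hp : (0 : Int) < 10 ^ e := pow_pos (by norm_num) e
          have he : (10 : Int) ^ (e + 1) = 10 ^ e * 10 := by ring
          omega) (by omega)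
      have hcast : ((10 : Int) ^ (e + 1) - 1).toNat = 10 ^ (e + 1) - 1 := by
        have h1 : ((10 ^ (e + 1) : Nat) : Int) = (10 : Int) ^ (e + 1) := by push_cast; ring
        have h2 : (1 : Nat) ≤ 10 ^ (e + 1) := Nat.one_le_pow _ _ (by norm_num)
        omega
      rw [hcast] at hgrp
      rw [pvmod_eq, hgrp, Int.emod_add_emod]
      congr 1
      ring

-- weighted prefix-sum difference of a (partial) decade in triangular-number form
lemma partial_decade (e : Nat) (n : Int)
    (h1 : (10 : Int) ^ e ≤ n) (h2 : n < 10 ^ (e + 1)) :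
    Sn n.toNat - Sn (10 ^ e - 1)
      = ((e : Int) + 1) * (Tm n - Tm ((10 : Int) ^ e - 1)) := by
  have hXpos : (1 : Int) ≤ (10 : Int) ^ e := one_le_pow₀ (by norm_num)
  have hy0 : 0 ≤ n := by omega
  have hycast : ((n.toNat : Int)) = n := Int.toNat_of_nonneg hy0
  have hb1 : (10 : Nat) ^ e ≤ n.toNat := by
    have : ((10 ^ e : Nat) : Int) ≤ n := by push_cast; omega
    omega
  have hb2 : n.toNat < 10 ^ (e + 1) := by
    have : n < ((10 ^ (e + 1) : Nat) : Int) := by push_cast; omega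
    omega
  have hdm := two_mul_Sn e n.toNat hb1 hb2
  rw [hycast, pvLen_pow] at hdm
  have ht1 := twoTm n
  have ht2 := twoTm ((10 : Int) ^ e - 1)
  have hdbl : 2 * (Sn n.toNat - Sn (10 ^ e - 1))
      = 2 * (((e : Int) + 1) * (Tm n - Tm ((10 : Int) ^ e - 1))) := by
    linear_combination hdm - ((e : Int) + 1) * ht1 + ((e : Int) + 1) * ht2
  exact mul_left_cancel₀ two_ne_zero hdbl

lemma altLoop_exit (fuel : Nat) (n total p : Int) (h : n < p) :
    solveAltLoop fuel n total p = total := by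
  cases fuel <;> simp [solveAltLoop, not_le.mpr h]

lemma altLoop_eq (fuel : Nat) :
    ∀ (e : Nat) (n t : Int), (10 : Int) ^ e ≤ n → n < 10 ^ e * 10 ^ fuel →
      solveAltLoop fuel n t ((10 : Int) ^ e)
        = t + (Sn n.toNat - Sn (10 ^ e - 1)) - (e : Int) * (Tm n - Tm ((10 : Int) ^ e - 1)) := by
  induction fuel with
  | zero =>
    intro e n t hx hf
    simp only [pow_zero, mul_one] at hf
    omega
  | succ fuel ih =>
    intro e n t hx hf
    simp only [solveAltLoop, if_pos hx]
    have hadd : PySem.Int.floordiv (n * (n + 1)) 2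
        - PySem.Int.floordiv ((10 : Int) ^ e * ((10 : Int) ^ e - 1)) 2
        = Tm n - Tm ((10 : Int) ^ e - 1) := by
      have h' : (10 : Int) ^ e * ((10 : Int) ^ e - 1)
          = ((10 : Int) ^ e - 1) * (((10 : Int) ^ e - 1) + 1) := by ring
      rw [h']
      rfl
    rw [hadd]
    have hnext : (10 : Int) ^ e * 10 = 10 ^ (e + 1) := by ring
    by_cases hc : (10 : Int) ^ (e + 1) ≤ n
    · -- another full decade follows
      have hf' : n < 10 ^ (e + 1) * 10 ^ fuel := by
        calc n < 10 ^ e * 10 ^ (fuel + 1) := hf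
        _ = 10 ^ (e + 1) * 10 ^ fuel := by ring
      rw [hnext, ih (e + 1) n _ hc hf']
      have hXpos : (1 : Int) ≤ (10 : Int) ^ (e + 1) := one_le_pow₀ (by norm_num)
      have hdec := partial_decade e ((10 : Int) ^ (e + 1) - 1)
        (by
          have hp : (0 : Int) < 10 ^ e := pow_pos (by norm_num) e
          have he : (10 : Int) ^ (e + 1) = 10 ^ e * 10 := by ring
          omega)
        (by omega)
      have hcast : ((10 : Int) ^ (e + 1) - 1).toNat = 10 ^ (e + 1) - 1 := by
        have h1 : ((10 ^ (e + 1) : Nat) : Int) = (10 : Int) ^ (e + 1) := by push_cast; ring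
        have h2 : (1 : Nat) ≤ 10 ^ (e + 1) := Nat.one_le_pow _ _ (by norm_num)
        omega
      rw [hcast] at hdec
      push_cast at hdec ⊢
      linear_combination -hdec
    · -- last pass: the loop exits at p = 10^(e+1)
      rw [not_le] at hc
      rw [hnext, altLoop_exit _ _ _ _ hc]
      have hpart := partial_decade e n hx hc
      linear_combination -hpart

lemma alt_eq (n : Int) (hbig : n < 10 ^ 64) : solve_alt n = Sn n.toNat % 998244353 := by
  unfold solve_alt
  by_cases hn : n < 1
  · rw [if_pos hn]
    have h0 : n.toNat = 0 := by omega
    rw [h0]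
    simp [Sn]
  · rw [if_neg hn]
    rw [not_lt] at hn
    have h1 : (1 : Int) = (10 : Int) ^ 0 := by norm_num
    have hx : (10 : Int) ^ 0 ≤ n := by simpa using hn
    have hf : n < 10 ^ 0 * 10 ^ 64 := by
      rw [pow_zero, one_mul]; exact hbig
    rw [h1, altLoop_eq 64 0 n 0 hx hf]
    norm_num [Sn, pvmod_eq]

-- ===== VERDICT helper =====
lemma solve_eq (n : Int) (hdom : Dom_solve n) : solve n = solve_alt n := by
  unfold solve
  have hdomle : n ≤ 2147483648 := by
    unfold Dom_solve pvDomInt at hdom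
    simp at hdom; omega
  rw [alt_eq n (by norm_num; omega)]
  by_cases hn : 1 ≤ n
  · have hx : (10 : Int) ^ 0 ≤ n := by simpa using hn
    have hf : n < 10 ^ 0 * 10 ^ 64 := by norm_num; omega
    have h1 : (1 : Int) = (10 : Int) ^ 0 := by norm_num
    rw [h1, loop_eq 64 0 n 0 hx hf]
    norm_num [Sn]
  · rw [loop_exit _ _ _ _ (by omega)]
    have h0 : n.toNat = 0 := by omega
    rw [h0]
    simp [Sn]

-- ===== VERDICT (by name: the statement is the Claim_ definition above) =====
theorem solve_spec : Claim_equal_solve := by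
  intro n hdom
  unfold Spec_solve
  exact solve_eq n hdom
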